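-- pv_equiv track=rewrite | github.com/clac-ca/automatic-data-extractor | apps/ade-api/src/ade_api/features/runs/summary_builder.py | _sum_if_complete
-- ===== SOURCE A (Python) =====
-- TableKey = tuple[str, str | None, int]
--
-- def _sum_if_complete(keys: list[TableKey], counts: dict[TableKey, int]) -> int | None:
--     if not keys:
--         return 0
--     total = 0
--     for key in keys:
--         if key not in counts:
--             return None
--         total += counts[key]
--     return total
-- ===== SOURCE B (Python) =====
-- def _sum_if_complete(keys, counts):
--     if not all(key in counts for key in keys):
--         return None
--     return sum(counts[key] for key in keys)
-- ===== Notes on version B (the rewrite author's own statement) =====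
-- stated objective: idiomatic
-- what changed: A's single fused loop with an early-exit accumulator is split into two separate passes: a completeness check with all(), then a summation with sum(); the explicit empty-list guard disappears since all([]) is True and sum([]) is 0.
import Mathlib
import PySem

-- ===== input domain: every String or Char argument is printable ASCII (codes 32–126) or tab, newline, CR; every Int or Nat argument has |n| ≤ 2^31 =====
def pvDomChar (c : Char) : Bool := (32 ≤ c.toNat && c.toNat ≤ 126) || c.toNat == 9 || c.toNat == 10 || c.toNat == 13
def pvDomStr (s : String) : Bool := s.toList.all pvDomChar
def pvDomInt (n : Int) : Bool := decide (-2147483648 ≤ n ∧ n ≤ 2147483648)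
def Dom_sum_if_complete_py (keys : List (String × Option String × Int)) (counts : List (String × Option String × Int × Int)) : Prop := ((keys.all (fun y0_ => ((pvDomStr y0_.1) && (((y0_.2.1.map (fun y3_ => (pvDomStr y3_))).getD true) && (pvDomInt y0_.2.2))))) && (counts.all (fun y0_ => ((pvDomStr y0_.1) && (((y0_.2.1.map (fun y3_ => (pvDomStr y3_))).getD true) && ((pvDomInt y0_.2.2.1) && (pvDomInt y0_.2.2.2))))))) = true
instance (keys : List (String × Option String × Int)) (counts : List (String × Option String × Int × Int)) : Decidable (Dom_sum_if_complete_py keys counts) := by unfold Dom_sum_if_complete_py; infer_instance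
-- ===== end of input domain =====

-- B splits A's fused early-exit accumulation loop into two separate passes (completeness check, then summation); same results, same cost.


-- dict lookup on an association list: first match (Python dict semantics)
def pvLookup (counts : List ((String × Option String × Int) × Int)) (k : String × Option String × Int) : Option Int :=
  (counts.find? (fun p => p.1 == k)).map (·.2)

-- ===== PORT A =====
-- the 'for key in keys' loop of A, carrying the running total, returning none on a missing key
def pvGoA (counts : List ((String × Option String × Int) × Int)) :
    List (String × Option String × Int) → Int → Option Int
  | [], total => some total
  | k :: ks, total =>
    match pvLookup counts k with
    | none => none
    | some v => pvGoA counts ks (total + v)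

def sum_if_complete_py (keys : List (String × Option String × Int)) (counts : List (String × Option String × Int × Int)) : Option Int :=
  if keys = [] then some 0 else pvGoA (counts.map (fun p => ((p.1, p.2.1, p.2.2.1), p.2.2.2))) keys 0

-- ===== PORT B =====
def sum_if_complete_py_alt (keys : List (String × Option String × Int)) (counts : List (String × Option String × Int × Int)) : Option Int :=
  let cs := counts.map (fun p => ((p.1, p.2.1, p.2.2.1), p.2.2.2))
  if keys.all (fun k => (pvLookup cs k).isSome) then
    some ((keys.map (fun k => (pvLookup cs k).getD 0)).sum)
  else
    none

-- ===== PRECONDITION & SPEC =====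
def Spec_sum_if_complete_py (keys : List (String × Option String × Int)) (counts : List (String × Option String × Int × Int)) (out : Option Int) : Prop := out = sum_if_complete_py_alt keys counts
instance (keys : List (String × Option String × Int)) (counts : List (String × Option String × Int × Int)) (out : Option Int) : Decidable (Spec_sum_if_complete_py keys counts out) := by unfold Spec_sum_if_complete_py; infer_instance

-- ===== CLAIM (what is proved, stated in full; the proofs are below) =====
def Claim_equal_sum_if_complete_py : Prop := ∀ (keys : List (String × Option String × Int)) (counts : List (String × Option String × Int × Int)), Dom_sum_if_complete_py keys counts → Spec_sum_if_complete_py keys counts (sum_if_complete_py keys counts)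

-- ===== LEMMAS AND PROOFS =====
theorem pvGoA_eq (cs : List ((String × Option String × Int) × Int)) (keys : List (String × Option String × Int)) (total : Int) :
    pvGoA cs keys total =
      if keys.all (fun k => (pvLookup cs k).isSome) then
        some (total + (keys.map (fun k => (pvLookup cs k).getD 0)).sum)
      else none := by
  induction keys generalizing total with
  | nil => simp [pvGoA]
  | cons k ks ih =>
    simp only [pvGoA, List.all_cons, List.map_cons, List.sum_cons]
    cases h : pvLookup cs k with
    | none => simp
    | some v =>
      simp only [Option.isSome_some, Bool.true_and, Option.getD_some, ih]
      split <;> simp [add_assoc]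

-- ===== VERDICT (by name: the statement is the Claim_ definition above) =====
theorem sum_if_complete_py_spec : Claim_equal_sum_if_complete_py := by
  intro keys counts _
  unfold Spec_sum_if_complete_py sum_if_complete_py sum_if_complete_py_alt
  cases keys with
  | nil => simp
  | cons k ks => simp [pvGoA_eq]
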